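-- pv_equiv track=rewrite | github.com/jinyoung7165/2023Sane | 프로그래머스/Lv2/n^2배열자르기.py | solution
-- ===== SOURCE A (Python) =====
-- def solution(n, left, right):
--     answer = []
--     for idx in range(left, right+1):
--         r = idx // n + 1
--         c = idx % n + 1
--         if r >= c:
--             answer.append(r)
--         else:
--             answer.append(c)
--     return answer
-- ===== SOURCE B (Python) =====
-- def solution(n, left, right):
--     if left > right:
--         return []
--     answer = []
--     sr, er = left // n, right // n
--     for row in range(sr, er + 1):
--         lo = left % n if row == sr else 0
--         hi = right % n if row == er else n - 1
--         for c in range(lo, hi + 1):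
--             answer.append(max(row, c) + 1)
--     return answer
-- ===== Notes on version B (the rewrite author's own statement) =====
-- stated objective: alternative
-- what changed: Replaced the flat per-index scan (one floordiv/mod per element) with a row-by-row traversal of the conceptual n-by-n matrix: only the slice's start and end rows are computed by division, each row emits its column span directly.
-- outside the precondition, e.g. on solution(-2, 0, 3): A returns [1, 0, 1, 0], B returns []
import Mathlib
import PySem

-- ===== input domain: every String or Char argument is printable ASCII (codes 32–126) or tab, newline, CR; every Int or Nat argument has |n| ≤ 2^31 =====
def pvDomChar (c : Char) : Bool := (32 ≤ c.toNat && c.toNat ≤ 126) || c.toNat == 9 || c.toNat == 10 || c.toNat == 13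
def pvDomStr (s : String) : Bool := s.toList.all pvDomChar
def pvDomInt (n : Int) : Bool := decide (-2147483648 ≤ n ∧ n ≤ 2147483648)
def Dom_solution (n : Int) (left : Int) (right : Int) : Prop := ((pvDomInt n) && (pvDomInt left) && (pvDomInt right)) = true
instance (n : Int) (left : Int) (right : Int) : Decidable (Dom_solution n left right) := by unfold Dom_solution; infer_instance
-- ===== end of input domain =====

-- B traverses the slice row by row of the conceptual n×n matrix instead of A's flat index scan; same output. (objective: alternative)

-- ===== PORT A =====
def solution (n : Int) (left : Int) (right : Int) : List Int :=
  (PySem.List.pyRange left (right + 1) 1).foldl (fun answer idx =>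
    let r := PySem.Int.floordiv idx n + 1
    let c := PySem.Int.mod idx n + 1
    if r ≥ c then answer ++ [r] else answer ++ [c]) []

-- ===== PORT B =====
def solution_alt (n : Int) (left : Int) (right : Int) : List Int :=
  if left > right then []
  else
    let sr := PySem.Int.floordiv left n
    let er := PySem.Int.floordiv right n
    (PySem.List.pyRange sr (er + 1) 1).foldl (fun answer row =>
      let lo := if row = sr then PySem.Int.mod left n else 0
      let hi := if row = er then PySem.Int.mod right n else n - 1
      (PySem.List.pyRange lo (hi + 1) 1).foldl (fun a c => a ++ [max row c + 1]) answer) []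

-- ===== PRECONDITION & SPEC =====
-- Pre_ restricts n to the problem's natural domain n ≥ 1 (n is the side length of the n×n matrix):
-- for n = 0 with a nonempty index range A raises ZeroDivisionError, and for negative n A returns
-- floor-division values that are meaningless for the matrix task and B does not reproduce;
-- an empty index range (right < left) is admitted for every n (both programs return []).
def Pre_solution (n : Int) (left : Int) (right : Int) : Prop := 1 ≤ n ∨ right < left
instance (n : Int) (left : Int) (right : Int) : Decidable (Pre_solution n left right) := by unfold Pre_solution; infer_instance
def pvWitness_solution : Int × Int × Int := (3, 2, 5)
def Spec_solution (n : Int) (left : Int) (right : Int) (out : List Int) : Prop := out = solution_alt n left right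
instance (n : Int) (left : Int) (right : Int) (out : List Int) : Decidable (Spec_solution n left right out) := by unfold Spec_solution; infer_instance

-- ===== CLAIM (what is proved, stated in full; the proofs are below) =====
def Claim_equal_solution : Prop := ∀ (n : Int) (left : Int) (right : Int), Dom_solution n left right → Pre_solution n left right → Spec_solution n left right (solution n left right)

-- ===== LEMMAS AND PROOFS =====

-- the value A assigns to flat index idx
def pvG (n idx : Int) : Int := max (PySem.Int.floordiv idx n) (PySem.Int.mod idx n) + 1

theorem pvA_eq_map (n l r : Int) :
    solution n l r = (PySem.List.pyRange l (r + 1) 1).map (pvG n) := by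
  unfold solution
  have hfun : (fun (answer : List Int) (idx : Int) =>
      let rr := PySem.Int.floordiv idx n + 1
      let cc := PySem.Int.mod idx n + 1
      if rr ≥ cc then answer ++ [rr] else answer ++ [cc]) =
      fun answer idx => answer ++ [pvG n idx] := by
    funext answer idx
    simp only [pvG]
    split_ifs with h
    · have he : max (PySem.Int.floordiv idx n) (PySem.Int.mod idx n) + 1
          = PySem.Int.floordiv idx n + 1 := by omega
      rw [he]
    · have he : max (PySem.Int.floordiv idx n) (PySem.Int.mod idx n) + 1
          = PySem.Int.mod idx n + 1 := by omega
      rw [he]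
  rw [hfun, PySem.List.foldl_append_singleton_eq_map, List.nil_append]

theorem pvFloordiv_bracket {a b q : Int} (hb : 0 < b) (h : PySem.Int.floordiv a b = q) :
    q * b ≤ a ∧ a < (q + 1) * b := by
  rw [PySem.Int.floordiv_eq_iff_of_pos hb] at h
  exact h

theorem pvMod_eq {a b q : Int} (h : PySem.Int.floordiv a b = q) :
    PySem.Int.mod a b = a - q * b := by
  have he := PySem.Int.floordiv_mul_add_mod a b
  rw [h] at he
  omega

-- one full or partial row: columns lo..hi of row `row` are the flat indices row*n+lo .. row*n+hi
theorem pvRowSeg (n row lo hi : Int) (hn : 0 < n) (hlo : 0 ≤ lo) (hhi : hi < n) :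
    (PySem.List.pyRange lo (hi + 1) 1).map (fun c => max row c + 1)
      = (PySem.List.pyRange (row * n + lo) (row * n + hi + 1) 1).map (pvG n) := by
  rw [PySem.List.pyRange_one lo (hi + 1), PySem.List.pyRange_one (row * n + lo) (row * n + hi + 1)]
  have hlen : (row * n + hi + 1 - (row * n + lo)).toNat = (hi + 1 - lo).toNat := by omega
  rw [hlen, List.map_map, List.map_map]
  apply List.map_congr_left
  intro k hk
  have hk' : (k : Int) < hi + 1 - lo := by
    have := List.mem_range.mp hk
    omega
  simp only [Function.comp]
  have hq : PySem.Int.floordiv (row * n + (lo + (k : Int))) n = row := by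
    rw [PySem.Int.floordiv_eq_iff_of_pos hn]
    constructor
    · nlinarith
    · nlinarith
  have harg : row * n + lo + (k : Int) = row * n + (lo + (k : Int)) := by ring
  have hm := pvMod_eq hq
  simp only [pvG, harg, hq, hm]
  have hms : row * n + (lo + (k : Int)) - row * n = lo + (k : Int) := by ring
  rw [hms]

-- rows s..er, each starting at column 0 (flat index s*n), cover flat indices s*n..r
theorem pvRows (n r er : Int) (hn : 0 < n) (her : PySem.Int.floordiv r n = er) :
    ∀ t : Nat, ∀ s : Int, (er - s).toNat = t → s ≤ er →
    (PySem.List.pyRange s (er + 1) 1).flatMap (fun row =>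
        (PySem.List.pyRange 0 ((if row = er then PySem.Int.mod r n else n - 1) + 1) 1).map
          (fun c => max row c + 1))
      = (PySem.List.pyRange (s * n) (r + 1) 1).map (pvG n) := by
  intro t
  induction t with
  | zero =>
    intro s ht hs
    have hse : s = er := by omega
    subst hse
    rw [PySem.List.pyRange_one_singleton]
    simp only [List.flatMap_cons, List.flatMap_nil, List.append_nil, if_true]
    have hm := pvMod_eq her
    have hb := pvFloordiv_bracket hn her
    have hm1 : PySem.Int.mod r n < n := by
      have : r < s * n + n := by nlinarith [hb.2]
      omega
    rw [pvRowSeg n s 0 (PySem.Int.mod r n) hn le_rfl hm1]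
    have he1 : s * n + 0 = s * n := by ring
    have he2 : s * n + PySem.Int.mod r n + 1 = r + 1 := by omega
    rw [he1, he2]
  | succ t ih =>
    intro s ht hs
    have hslt : s < er := by omega
    rw [PySem.List.pyRange_one_cons (by omega : s < er + 1)]
    simp only [List.flatMap_cons]
    rw [if_neg (by omega : ¬ s = er)]
    rw [ih (s + 1) (by omega) (by omega)]
    rw [pvRowSeg n s 0 (n - 1) hn le_rfl (by omega)]
    have he1 : s * n + 0 = s * n := by ring
    have he2 : s * n + (n - 1) + 1 = (s + 1) * n := by ring
    rw [he1, he2, ← List.map_append, ← PySem.List.pyRange_one_append]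
    · nlinarith
    · have hb := pvFloordiv_bracket hn her
      nlinarith [hb.1]

-- the whole slice: B's flatMap-of-rows form equals the flat index scan
theorem pvTop (n l r sr er : Int) (hn : 0 < n) (hlr : l ≤ r)
    (hsr : PySem.Int.floordiv l n = sr) (her : PySem.Int.floordiv r n = er) :
    (PySem.List.pyRange sr (er + 1) 1).flatMap (fun row =>
        (PySem.List.pyRange (if row = sr then PySem.Int.mod l n else 0)
            ((if row = er then PySem.Int.mod r n else n - 1) + 1) 1).map
          (fun c => max row c + 1))
      = (PySem.List.pyRange l (r + 1) 1).map (pvG n) := by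
  have hbl := pvFloordiv_bracket hn hsr
  have hbr := pvFloordiv_bracket hn her
  have hml := pvMod_eq hsr
  have hmr := pvMod_eq her
  have hln : l < sr * n + n := by nlinarith [hbl.2]
  have hrn : r < er * n + n := by nlinarith [hbr.2]
  have hse : sr ≤ er := by nlinarith [hbl.1, hbr.2]
  rcases eq_or_lt_of_le hse with hseq | hslt
  · subst hseq
    rw [PySem.List.pyRange_one_singleton]
    simp only [List.flatMap_cons, List.flatMap_nil, List.append_nil, if_true]
    have hm1 : PySem.Int.mod r n < n := by omega
    have hm0 : 0 ≤ PySem.Int.mod l n := by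
      have := hbl.1
      omega
    rw [pvRowSeg n sr (PySem.Int.mod l n) (PySem.Int.mod r n) hn hm0 hm1]
    have he1 : sr * n + PySem.Int.mod l n = l := by omega
    have he2 : sr * n + PySem.Int.mod r n + 1 = r + 1 := by omega
    rw [he1, he2]
  · rw [PySem.List.pyRange_one_cons (by omega : sr < er + 1)]
    simp only [List.flatMap_cons, if_true]
    rw [if_neg (by omega : ¬ sr = er)]
    have hcong : (PySem.List.pyRange (sr + 1) (er + 1) 1).flatMap (fun row =>
          (PySem.List.pyRange (if row = sr then PySem.Int.mod l n else 0)
              ((if row = er then PySem.Int.mod r n else n - 1) + 1) 1).map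
            (fun c => max row c + 1))
        = (PySem.List.pyRange (sr + 1) (er + 1) 1).flatMap (fun row =>
          (PySem.List.pyRange 0 ((if row = er then PySem.Int.mod r n else n - 1) + 1) 1).map
            (fun c => max row c + 1)) := by
      apply List.flatMap_congr
      intro row hrow
      have := (PySem.List.mem_pyRange_one).mp hrow
      rw [if_neg (by omega : ¬ row = sr)]
    rw [hcong, pvRows n r er hn her (er - (sr + 1)).toNat (sr + 1) rfl (by omega)]
    have hm0 : 0 ≤ PySem.Int.mod l n := by
      have := hbl.1
      omega
    rw [pvRowSeg n sr (PySem.Int.mod l n) (n - 1) hn hm0 (by omega)]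
    have he1 : sr * n + PySem.Int.mod l n = l := by omega
    have he2 : sr * n + (n - 1) + 1 = (sr + 1) * n := by ring
    rw [he1, he2, ← List.map_append, ← PySem.List.pyRange_one_append]
    · omega
    · nlinarith [hbr.1]

-- ===== VERDICT (by name: the statement is the Claim_ definition above) =====
theorem solution_spec : Claim_equal_solution := by
  unfold Claim_equal_solution
  intro n l r _ hpre
  unfold Pre_solution at hpre
  unfold Spec_solution
  rcases le_or_gt l r with hlr | hlr
  · have hn : 0 < n := by omega
    simp only [solution_alt]
    rw [if_neg (by omega : ¬ l > r)]
    have h1 : (PySem.List.pyRange (PySem.Int.floordiv l n) (PySem.Int.floordiv r n + 1) 1).foldl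
          (fun answer row =>
            (PySem.List.pyRange (if row = PySem.Int.floordiv l n then PySem.Int.mod l n else 0)
                ((if row = PySem.Int.floordiv r n then PySem.Int.mod r n else n - 1) + 1) 1).foldl
              (fun a c => a ++ [max row c + 1]) answer) []
        = (PySem.List.pyRange (PySem.Int.floordiv l n) (PySem.Int.floordiv r n + 1) 1).foldl
          (fun answer row =>
            answer ++ (PySem.List.pyRange (if row = PySem.Int.floordiv l n then PySem.Int.mod l n else 0)
                ((if row = PySem.Int.floordiv r n then PySem.Int.mod r n else n - 1) + 1) 1).map
              (fun c => max row c + 1)) []:= by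
      apply PySem.List.foldl_congr_mem
      intro acc row _
      rw [PySem.List.foldl_append_singleton_eq_map]
    rw [h1, PySem.List.foldl_append_eq_flatMap, List.nil_append, pvA_eq_map]
    exact (pvTop n l r _ _ hn hlr rfl rfl).symm
  · rw [pvA_eq_map, PySem.List.pyRange_one_eq_nil (by omega : r + 1 ≤ l)]
    simp [solution_alt, hlr]
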